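-- pv_equiv track=rewrite | github.com/matinabbasi788/contest | codeforces/1837-B.py | solve
-- ===== SOURCE A (Python) =====
-- def solve(n, s):
--     c = 0
--     best = 0
--     for i in range(len(s) - 1):
--         if s[i] == s[i+1]:
--             c += 1
--             best = max(c, best)
--         else:
--             c = 0
--     return best
-- ===== SOURCE B (Python) =====
-- def solve(n, s):
--     # Two-pointer run scan: advance j to the end of each maximal run of equal
--     # characters; the run contributes (length - 1) adjacent equal pairs.
--     best = 0
--     i = 0
--     m = len(s)
--     while i < m:
--         j = i + 1
--         while j < m and s[j] == s[i]:
--             j += 1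
--         best = max(best, j - i - 1)
--         i = j
--     return best
-- ===== Notes on version B (the rewrite author's own statement) =====
-- stated objective: alternative
-- what changed: Replaces the running-counter-with-reset over every adjacent index pair by a two-pointer scan that partitions the string into maximal runs of equal characters and takes max(run length - 1).
import Mathlib
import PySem

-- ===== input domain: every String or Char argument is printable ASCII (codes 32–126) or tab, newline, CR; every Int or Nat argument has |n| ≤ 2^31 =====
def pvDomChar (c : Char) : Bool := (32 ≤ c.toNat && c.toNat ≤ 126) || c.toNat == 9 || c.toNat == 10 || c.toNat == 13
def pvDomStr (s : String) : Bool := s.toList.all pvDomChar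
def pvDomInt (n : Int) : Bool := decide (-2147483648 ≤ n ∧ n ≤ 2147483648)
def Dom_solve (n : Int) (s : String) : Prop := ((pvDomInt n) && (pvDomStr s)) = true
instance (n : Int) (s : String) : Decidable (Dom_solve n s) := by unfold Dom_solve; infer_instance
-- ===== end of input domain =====

-- B replaces A's running-counter-with-reset over adjacent index pairs by a
-- two-pointer scan over maximal runs of equal characters (alternative decomposition, same O(n) cost).

-- ===== PORT A =====
def solve (n : Int) (s : String) : Int :=
  ((PySem.List.pyRange 0 (PySem.Str.len s - 1) 1).foldl
    (fun (acc : Int × Int) i =>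
      if PySem.Str.pyGet? s i = PySem.Str.pyGet? s (i + 1) then
        (acc.1 + 1, max (acc.1 + 1) acc.2)
      else
        (0, acc.2))
    (0, 0)).2

-- ===== PORT B =====
-- inner while: consume the rest of the run of character `c`; returns
-- (number of consumed characters, remaining suffix)
def runSplit (c : Char) : List Char → Nat × List Char
  | [] => (0, [])
  | x :: xs =>
    if x = c then
      let r := runSplit c xs
      (r.1 + 1, r.2)
    else
      (0, x :: xs)

theorem runSplit_length_le (c : Char) (l : List Char) :
    (runSplit c l).2.length ≤ l.length := by
  induction l with
  | nil => simp [runSplit]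
  | cons x xs ih =>
    by_cases h : x = c <;> simp [runSplit, h] <;> omega

-- outer while: one step per maximal run
def bestRun (best : Int) : List Char → Int
  | [] => best
  | x :: rest =>
    let r := runSplit x rest
    bestRun (max best (r.1 : Int)) r.2
  termination_by l => l.length
  decreasing_by
    have := runSplit_length_le x rest
    simp only [List.length_cons]
    omega

def solve_alt (n : Int) (s : String) : Int :=
  bestRun 0 s.toList

-- ===== PRECONDITION & SPEC =====
def Spec_solve (n : Int) (s : String) (out : Int) : Prop := out = solve_alt n s
instance (n : Int) (s : String) (out : Int) : Decidable (Spec_solve n s out) := by unfold Spec_solve; infer_instance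

-- ===== CLAIM (what is proved, stated in full; the proofs are below) =====
def Claim_equal_solve : Prop := ∀ (n : Int) (s : String), Dom_solve n s → Spec_solve n s (solve n s)

-- ===== LEMMAS AND PROOFS =====

-- structural form of A's loop (consumes adjacent pairs, same state (c, best))
def loopA (c best : Int) : List Char → Int
  | [] => best
  | [_] => best
  | x :: y :: rest =>
    if x = y then loopA (c + 1) (max (c + 1) best) (y :: rest)
    else loopA 0 best (y :: rest)

-- shifting the index range by one = dropping the head of the list
theorem pyGet?_cons_shift {α : Type} (x : α) (l : List α) (i : Int) (hi : 0 ≤ i) :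
    PySem.List.pyGet? (x :: l) (i + 1) = PySem.List.pyGet? l i := by
  have h1 : PySem.List.pyGet? (x :: l) (i + 1) = (x :: l)[(i + 1).toNat]? :=
    PySem.List.pyGet?_of_nonneg _ (by omega)
  have h2 : PySem.List.pyGet? l i = l[i.toNat]? := PySem.List.pyGet?_of_nonneg _ hi
  have h3 : (i + 1).toNat = i.toNat + 1 := by omega
  rw [h1, h2, h3]
  simp

theorem fold_shift (x : Char) (l : List Char) (b : Int) (init : Int × Int) :
    (PySem.List.pyRange 1 (b + 1) 1).foldl
      (fun (acc : Int × Int) i =>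
        if PySem.List.pyGet? (x :: l) i = PySem.List.pyGet? (x :: l) (i + 1) then
          (acc.1 + 1, max (acc.1 + 1) acc.2)
        else (0, acc.2)) init
    = (PySem.List.pyRange 0 b 1).foldl
      (fun (acc : Int × Int) i =>
        if PySem.List.pyGet? l i = PySem.List.pyGet? l (i + 1) then
          (acc.1 + 1, max (acc.1 + 1) acc.2)
        else (0, acc.2)) init := by
  rw [PySem.List.pyRange_one 1 (b + 1), PySem.List.pyRange_one 0 b]
  have hb : (b + 1 - 1).toNat = (b - 0).toNat := by omega
  rw [hb, List.foldl_map, List.foldl_map]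
  apply PySem.List.foldl_congr_mem
  intro acc k _
  have e1 : (1 : Int) + (k : Int) = (0 + (k : Int)) + 1 := by ring
  rw [e1, pyGet?_cons_shift x l _ (by omega),
    pyGet?_cons_shift x l (0 + (k : Int) + 1) (by omega)]

-- A's index fold equals the structural pair loop
theorem solve_eq_loopA_aux (l : List Char) :
    ∀ (c best : Int),
    ((PySem.List.pyRange 0 ((l.length : Int) - 1) 1).foldl
      (fun (acc : Int × Int) i =>
        if PySem.List.pyGet? l i = PySem.List.pyGet? l (i + 1) then
          (acc.1 + 1, max (acc.1 + 1) acc.2)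
        else (0, acc.2)) (c, best)).2 = loopA c best l := by
  induction l with
  | nil =>
    intro c best
    rw [PySem.List.pyRange_one_eq_nil (by simp)]
    rfl
  | cons x t ih =>
    intro c best
    cases t with
    | nil =>
      rw [PySem.List.pyRange_one_eq_nil (by simp)]
      rfl
    | cons y rest =>
      have hlen : ((x :: y :: rest).length : Int) - 1 = ((y :: rest).length : Int) := by
        simp
      rw [hlen]
      rw [PySem.List.pyRange_one_cons (by simp)]
      have hx : PySem.List.pyGet? (x :: y :: rest) 0 = some x :=
        PySem.List.pyGet?_zero_cons x (y :: rest)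
      have hy : PySem.List.pyGet? (x :: y :: rest) (0 + 1) = some y := by
        rw [pyGet?_cons_shift x (y :: rest) 0 le_rfl]
        exact PySem.List.pyGet?_zero_cons y rest
      simp only [List.foldl_cons, hx, hy]
      have h01 : (0 : Int) + 1 = 1 := by norm_num
      have hsplit : ((y :: rest).length : Int) = (((y :: rest).length : Int) - 1) + 1 := by
        omega
      rw [h01, hsplit, fold_shift x (y :: rest)]
      by_cases hxy : x = y
      · rw [if_pos (congrArg _ hxy), ih (c + 1) (max (c + 1) best)]
        simp [loopA, hxy]
      · rw [if_neg (fun h => hxy (Option.some.inj h)), ih 0 best]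
        simp [loopA, hxy]

-- the pair loop equals the run scan, given the loop state invariant 0 ≤ c ≤ best
theorem loopA_eq_bestRun (rest : List Char) :
    ∀ (x : Char) (c best : Int), 0 ≤ c → c ≤ best →
    loopA c best (x :: rest) =
      bestRun (max best (c + ((runSplit x rest).1 : Int))) (runSplit x rest).2 := by
  induction rest with
  | nil =>
    intro x c best hc hcb
    simp only [loopA, runSplit, bestRun]
    omega
  | cons y t ih =>
    intro x c best hc hcb
    by_cases hxy : x = y
    · subst hxy
      have hL : loopA c best (x :: x :: t) = loopA (c + 1) (max (c + 1) best) (x :: t) := by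
        simp [loopA]
      have hR : runSplit x (x :: t) = ((runSplit x t).1 + 1, (runSplit x t).2) := by
        simp [runSplit]
      rw [hL, hR, ih x (c + 1) (max (c + 1) best) (by omega) (le_max_left _ _)]
      have hst : max (max (c + 1) best) (c + 1 + (((runSplit x t).1 : Nat) : Int))
          = max best (c + ((((runSplit x t).1 + 1 : Nat)) : Int)) := by
        push_cast
        omega
      rw [hst]
    · have hL : loopA c best (x :: y :: t) = loopA 0 best (y :: t) := by
        simp [loopA, hxy]
      rw [hL]
      have hrs : runSplit x (y :: t) = (0, y :: t) := by
        simp only [runSplit]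
        rw [if_neg (Ne.symm hxy)]
      rw [hrs]
      have hmb : max best (c + ((0 : Nat) : Int)) = best := by
        simp; omega
      rw [hmb, ih y 0 best le_rfl (by omega)]
      conv_rhs => rw [bestRun]
      simp

theorem solve_eq_alt (n : Int) (s : String) : solve n s = solve_alt n s := by
  unfold solve solve_alt
  have hget : ∀ i, PySem.Str.pyGet? s i = PySem.List.pyGet? s.toList i := by
    intro i; simp
  have hlen : PySem.Str.len s = (s.toList.length : Int) := by simp
  simp only [hlen, hget]
  rw [solve_eq_loopA_aux s.toList 0 0]
  cases h : s.toList with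
  | nil => simp [loopA, bestRun]
  | cons x rest =>
    rw [loopA_eq_bestRun rest x 0 0 le_rfl le_rfl]
    conv_rhs => rw [bestRun]
    congr 1
    simp

-- ===== VERDICT (by name: the statement is the Claim_ definition above) =====
theorem solve_spec : Claim_equal_solve := by
  intro n s _
  unfold Spec_solve
  exact solve_eq_alt n s
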